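-- pv_equiv track=rewrite | github.com/Palash403/Hangman-Game | hang.py | incode
-- ===== SOURCE A (Python) =====
-- def incode(value):
--     word = ""
--     for data in range(len(value)):
--       if data%2==0:
--         word = word+value[data]
--       else:
--         word = word+"_"
--     return word.upper()
-- ===== SOURCE B (Python) =====
-- def incode(value):
--     chars = list(value.upper())
--     chars[1::2] = "_" * (len(chars) // 2)
--     return "".join(chars)
-- ===== Notes on version B (the rewrite author's own statement) =====
-- stated objective: faster
-- what changed: B builds no string char by char and tests no parity: it uppercases the whole input once, then bulk-overwrites the odd positions with underscores via an extended slice assignment, and joins; the per-character Python-level loop and repeated string concatenation disappear in favour of three bulk C-level operations.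
import Mathlib
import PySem

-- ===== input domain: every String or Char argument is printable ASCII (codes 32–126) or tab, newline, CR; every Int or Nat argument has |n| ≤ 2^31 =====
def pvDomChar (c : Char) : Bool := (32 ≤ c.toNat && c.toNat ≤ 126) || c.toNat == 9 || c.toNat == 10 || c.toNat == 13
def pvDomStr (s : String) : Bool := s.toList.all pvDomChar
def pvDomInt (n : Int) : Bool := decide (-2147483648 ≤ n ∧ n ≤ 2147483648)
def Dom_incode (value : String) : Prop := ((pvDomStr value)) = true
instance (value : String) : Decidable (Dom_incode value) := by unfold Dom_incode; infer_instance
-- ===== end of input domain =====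

-- B drops the char-by-char parity loop: it uppercases the whole string once, then bulk-replaces the odd positions with '_' (Python extended slice assignment chars[1::2]) and joins; same O(n) cost, different construction.


-- ===== PORT A =====
def incode (value : String) : String :=
  let cs := value.toList
  let word := (PySem.List.pyRange 0 (cs.length : Int) 1).foldl
    (fun word data =>
      if data % 2 = 0 then word ++ [PySem.List.pyGetD cs data ' ']
      else word ++ ['_'])
    []
  PySem.Str.upper (String.ofList word)

-- ===== PORT B =====
-- Python's extended slice assignment chars[1::2] = '_' * (n // 2) replaces exactly the
-- characters at odd positions by '_' (the replacement length n // 2 equals the slice length,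
-- so no resizing occurs); replaceOdds is that replacement, exact.
def replaceOdds : List Char → List Char
  | [] => []
  | [c] => [c]
  | c :: _ :: rest => c :: '_' :: replaceOdds rest

def incode_alt (value : String) : String :=
  let chars := (PySem.Str.upper value).toList
  String.ofList (replaceOdds chars)

-- ===== PRECONDITION & SPEC =====
def Spec_incode (value : String) (out : String) : Prop := out = incode_alt value
instance (value : String) (out : String) : Decidable (Spec_incode value out) := by unfold Spec_incode; infer_instance

-- ===== CLAIM (what is proved, stated in full; the proofs are below) =====
def Claim_equal_incode : Prop := ∀ (value : String), Dom_incode value → Spec_incode value (incode value)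

-- ===== LEMMAS AND PROOFS =====

-- the word A's loop builds: keep even-index chars, '_' in place of odd-index chars
def interleave : List Char → List Char
  | [] => []
  | [c] => [c]
  | c :: _ :: rest => c :: '_' :: interleave rest

lemma natA : ∀ cs : List Char,
    (List.range cs.length).map (fun k => if k % 2 = 0 then cs.getD k ' ' else '_') = interleave cs := by
  intro cs
  induction cs using interleave.induct with
  | case1 => rfl
  | case2 c => rfl
  | case3 c d rest ih =>
    show (List.range (rest.length + 1 + 1)).map _ = _
    rw [List.range_succ_eq_map, List.range_succ_eq_map]
    simp only [List.map_cons, List.map_map, interleave, List.cons.injEq]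
    refine ⟨by norm_num, by norm_num, ?_⟩
    rw [← ih]
    apply List.map_congr_left
    intro k _
    have h2 : (k + 1 + 1) % 2 = k % 2 := by omega
    simp [Function.comp, Nat.succ_eq_add_one, h2]

lemma wordA (cs : List Char) :
    (PySem.List.pyRange 0 (cs.length : Int) 1).foldl
      (fun word data =>
        if data % 2 = 0 then word ++ [PySem.List.pyGetD cs data ' ']
        else word ++ ['_'])
      [] = interleave cs := by
  have hbody : (fun (word : List Char) (data : Int) =>
      if data % 2 = 0 then word ++ [PySem.List.pyGetD cs data ' '] else word ++ ['_'])
      = fun word data => word ++ [if data % 2 = 0 then PySem.List.pyGetD cs data ' ' else '_'] := by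
    funext w d; split <;> rfl
  rw [hbody, PySem.List.foldl_append_singleton_eq_map, PySem.List.pyRange_one]
  simp only [Int.sub_zero, Int.toNat_natCast, List.map_map, List.nil_append]
  rw [← natA cs]
  apply List.map_congr_left
  intro k _
  have hc : (((k : Nat) : Int) % 2 = 0) ↔ ((k : Nat) % 2 = 0) := by omega
  simp only [Function.comp_apply, hc, zero_add, PySem.List.pyGetD_natCast,
    List.getD_eq_getElem?_getD]

-- uppercasing commutes with building the masked word ('_' is a fixed point of upperChar)
lemma upper_interleave (cs : List Char) :
    PySem.Chars.upper (interleave cs) = replaceOdds (PySem.Chars.upper cs) := by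
  induction cs using interleave.induct with
  | case1 => rfl
  | case2 c => rfl
  | case3 c d rest ih =>
    show PySem.Chars.upper (c :: '_' :: interleave rest)
        = replaceOdds (PySem.Chars.upper (c :: d :: rest))
    simp only [PySem.Chars.upper, List.map_cons] at *
    show _ :: PySem.Chars.upperChar '_' :: _ = _ :: '_' :: _
    rw [show PySem.Chars.upperChar '_' = '_' from rfl, ih]

-- ===== VERDICT (by name: the statement is the Claim_ definition above) =====
theorem incode_spec : Claim_equal_incode := by
  intro value _
  show incode value = incode_alt value
  simp only [incode, incode_alt, wordA]
  apply String.toList_injective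
  simp only [PySem.Str.toList_upper, String.toList_ofList, upper_interleave]
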